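-- pv_equiv track=rewrite | github.com/KuGouGo/Rules | .github/scripts/process_rules.py | _deduplicate_domains
-- ===== SOURCE A (Python) =====
-- from typing import Dict, Set, List, Optional, Tuple
--
-- def _deduplicate_domains(domains: Set[str], domain_suffixes: Set[str]) -> Set[str]:
--     if not domains or not domain_suffixes:
--         return domains
--
--     filtered_domains = set()
--     for domain in domains:
--         is_redundant = False
--         domain_parts = domain.split('.')
--
--         for suffix in domain_suffixes:
--             suffix_parts = suffix.split('.')
--             if (len(domain_parts) >= len(suffix_parts) and
--                 domain_parts[-len(suffix_parts):] == suffix_parts):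
--                 is_redundant = True
--                 break
--
--         if not is_redundant:
--             filtered_domains.add(domain)
--
--     return filtered_domains
-- ===== SOURCE B (Python) =====
-- def _deduplicate_domains(domains, domain_suffixes):
--     if not domains or not domain_suffixes:
--         return domains
--
--     terminals = {tuple(reversed(suffix.split('.'))) for suffix in domain_suffixes}
--
--     result = set()
--     for domain in domains:
--         rev = tuple(reversed(domain.split('.')))
--         if not any(rev[:k] in terminals for k in range(1, len(rev) + 1)):
--             result.add(domain)
--     return result
-- ===== Notes on version B (the rewrite author's own statement) =====
-- stated objective: faster
-- what changed: B precomputes a hash set of reversed suffix component-tuples once and tests each domain by membership of its reversed component prefixes, instead of A's per-domain rescan and re-split of every suffix.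
import Mathlib
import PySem

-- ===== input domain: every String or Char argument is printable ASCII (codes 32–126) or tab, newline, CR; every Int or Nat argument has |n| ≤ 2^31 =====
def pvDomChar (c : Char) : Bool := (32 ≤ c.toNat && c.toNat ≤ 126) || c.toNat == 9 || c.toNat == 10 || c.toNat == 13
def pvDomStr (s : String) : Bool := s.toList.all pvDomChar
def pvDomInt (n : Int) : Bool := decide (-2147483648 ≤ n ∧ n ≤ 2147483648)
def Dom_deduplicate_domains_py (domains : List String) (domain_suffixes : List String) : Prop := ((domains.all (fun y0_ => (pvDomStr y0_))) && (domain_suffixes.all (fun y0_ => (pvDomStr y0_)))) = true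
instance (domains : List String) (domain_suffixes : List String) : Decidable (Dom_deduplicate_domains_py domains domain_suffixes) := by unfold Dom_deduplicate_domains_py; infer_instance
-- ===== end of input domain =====

-- B replaces A's per-domain linear scan over all suffixes by a precomputed hash set of
-- reversed suffix component-tuples, checked against each reversed prefix of the domain.

-- ===== PORT A =====
-- inner 'for suffix in domain_suffixes: … break' loop of A
def aIsRedundant (domain_parts : List String) : List String → Bool
  | [] => false
  | suffix :: rest =>
    let suffix_parts := (PySem.Str.split? suffix ".").getD []   -- sep "." ≠ "" so split? is always some
    if decide (domain_parts.length ≥ suffix_parts.length) &&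
        (PySem.List.slice domain_parts (some (-(suffix_parts.length : Int))) none == suffix_parts)
    then true
    else aIsRedundant domain_parts rest

def deduplicate_domains_py (domains : List String) (domain_suffixes : List String) : List String :=
  if domains.isEmpty || domain_suffixes.isEmpty then domains
  else
    domains.foldl
      (fun filtered_domains domain =>
        let domain_parts := (PySem.Str.split? domain ".").getD []
        let is_redundant := aIsRedundant domain_parts domain_suffixes
        if !is_redundant then PySem.Set.add filtered_domains domain else filtered_domains)
      PySem.Set.empty

-- ===== PORT B =====
def deduplicate_domains_py_alt (domains : List String) (domain_suffixes : List String) : List String :=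
  if domains.isEmpty || domain_suffixes.isEmpty then domains
  else
    let terminals : PySem.Set (List String) :=
      PySem.Set.ofList (domain_suffixes.map (fun suffix => ((PySem.Str.split? suffix ".").getD []).reverse))
    domains.foldl
      (fun result domain =>
        let rev := ((PySem.Str.split? domain ".").getD []).reverse
        if !((PySem.List.pyRange 1 ((rev.length : Int) + 1) 1).any
              (fun k => PySem.Set.contains terminals (PySem.List.slice rev none (some k))))
        then PySem.Set.add result domain else result)
      PySem.Set.empty

-- ===== PRECONDITION & SPEC =====
def Spec_deduplicate_domains_py (domains : List String) (domain_suffixes : List String) (out : List String) : Prop := out = deduplicate_domains_py_alt domains domain_suffixes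
instance (domains : List String) (domain_suffixes : List String) (out : List String) : Decidable (Spec_deduplicate_domains_py domains domain_suffixes out) := by unfold Spec_deduplicate_domains_py; infer_instance

-- ===== CLAIM (what is proved, stated in full; the proofs are below) =====
def Claim_equal_deduplicate_domains_py : Prop := ∀ (domains : List String) (domain_suffixes : List String), Dom_deduplicate_domains_py domains domain_suffixes → Spec_deduplicate_domains_py domains domain_suffixes (deduplicate_domains_py domains domain_suffixes)

-- ===== LEMMAS AND PROOFS =====

theorem go_ne_nil (sep : List Char) : ∀ (fuel : Nat) (l cur : List Char) (acc : List (List Char)),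
    PySem.Chars.splitOn.go sep fuel l cur acc ≠ [] := by
  intro fuel
  induction fuel with
  | zero => intro l cur acc; simp [PySem.Chars.splitOn.go]
  | succ n ih =>
    intro l cur acc
    cases l with
    | nil => simp [PySem.Chars.splitOn.go]
    | cons c rest =>
      rw [PySem.Chars.splitOn.go]
      split <;> apply ih

theorem splitDot_ne_nil (s : String) : (PySem.Str.split? s ".").getD [] ≠ [] := by
  simp [PySem.Str.split?, PySem.Chars.split?, PySem.Chars.splitOn, List.isEmpty]
  exact go_ne_nil _ _ _ _ _

-- A's break-loop is List.any of the per-suffix test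
theorem aIsRedundant_eq_any (domain_parts : List String) (suffixes : List String) :
    aIsRedundant domain_parts suffixes =
      suffixes.any (fun suffix =>
        let sp := (PySem.Str.split? suffix ".").getD []
        decide (domain_parts.length ≥ sp.length) &&
          (PySem.List.slice domain_parts (some (-(sp.length : Int))) none == sp)) := by
  induction suffixes with
  | nil => rfl
  | cons s rest ih =>
    simp only [aIsRedundant, List.any_cons]
    split <;> rename_i h <;> simp_all

-- per-domain equality of the two redundancy tests
theorem pred_eq (suffixes : List String) (domain : String) :
    aIsRedundant ((PySem.Str.split? domain ".").getD []) suffixes =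
      ((PySem.List.pyRange 1 (((((PySem.Str.split? domain ".").getD []).reverse.length : Nat) : Int) + 1) 1).any
        (fun k => PySem.Set.contains
          (PySem.Set.ofList (suffixes.map (fun suffix => ((PySem.Str.split? suffix ".").getD []).reverse)))
          (PySem.List.slice ((PySem.Str.split? domain ".").getD []).reverse none (some k)))) := by
  set parts := (PySem.Str.split? domain ".").getD [] with hparts
  rw [aIsRedundant_eq_any]
  apply Bool.eq_iff_iff.mpr
  simp only [List.any_eq_true]
  constructor
  · rintro ⟨s, hs, hcond⟩
    simp only [Bool.and_eq_true, decide_eq_true_eq, beq_iff_eq] at hcond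
    obtain ⟨hlen, hslice⟩ := hcond
    set sp := (PySem.Str.split? s ".").getD [] with hsp
    have hpos : 0 < sp.length := List.length_pos_iff.mpr (splitDot_ne_nil s)
    refine ⟨(sp.length : Int), ?_, ?_⟩
    · rw [PySem.List.mem_pyRange_one]
      constructor
      · exact_mod_cast hpos
      · simp only [List.length_reverse]; omega
    · rw [PySem.Set.contains_iff, PySem.Set.mem_ofList]
      refine List.mem_map.mpr ⟨s, hs, ?_⟩
      rw [PySem.List.slice_to_natCast, List.take_reverse, ← hsp]
      rw [PySem.List.slice_from_neg_natCast _ _ hpos] at hslice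
      rw [hslice]
  · rintro ⟨k, hk, hmem⟩
    rw [PySem.List.mem_pyRange_one] at hk
    obtain ⟨hk1, hk2⟩ := hk
    rw [PySem.Set.contains_iff, PySem.Set.mem_ofList] at hmem
    obtain ⟨s, hs, hrev⟩ := List.mem_map.mp hmem
    set sp := (PySem.Str.split? s ".").getD [] with hsp
    have hknat : k = ((k.toNat : Nat) : Int) := by omega
    rw [hknat, PySem.List.slice_to_natCast] at hrev
    have hkle : k.toNat ≤ parts.length := by
      simp only [List.length_reverse] at hk2; omega
    have hlensp : sp.length = k.toNat := by
      have := congrArg List.length hrev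
      simp only [List.length_reverse, List.length_take] at this
      omega
    refine ⟨s, hs, ?_⟩
    simp only [Bool.and_eq_true, decide_eq_true_eq, beq_iff_eq, ← hsp]
    constructor
    · omega
    · have hpos : 0 < sp.length := List.length_pos_iff.mpr (splitDot_ne_nil s)
      rw [hlensp, PySem.List.slice_from_neg_natCast _ _ (by omega)]
      have : parts.reverse.take k.toNat = sp.reverse := by
        rw [hrev]
      rw [List.take_reverse] at this
      have := congrArg List.reverse this
      simpa using this

-- ===== VERDICT (by name: the statement is the Claim_ definition above) =====
theorem deduplicate_domains_py_spec : Claim_equal_deduplicate_domains_py := by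
  intro domains domain_suffixes _
  unfold Spec_deduplicate_domains_py deduplicate_domains_py deduplicate_domains_py_alt
  split
  · rfl
  · apply List.foldl_ext
    intro filtered domain _
    simp only
    rw [pred_eq domain_suffixes domain]
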